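-- pv_equiv track=rewrite | github.com/VecnyOptimista/pyladies-2019-l | seznamy/seznamy/BONUS_7.py | generuj_piskvorky
-- ===== SOURCE A (Python) =====
-- def generuj_piskvorky(velikost):
--     vysledek = []
--
--     for radek in range(velikost):
--         seznam_radku = []
--         for bunka in range(velikost):
--             if bunka == radek:
--                 seznam_radku.append("O")
--             else:
--                 seznam_radku.append("X")
--         vysledek.append(seznam_radku)
--     return vysledek
-- ===== SOURCE B (Python) =====
-- def generuj_piskvorky(velikost):
--     vysledek = []
--     radek = ["O"] + ["X"] * (velikost - 1)
--     for _ in range(velikost):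
--         vysledek.append(radek)
--         radek = radek[-1:] + radek[:-1]
--     return vysledek
-- ===== Notes on version B (the rewrite author's own statement) =====
-- stated objective: alternative
-- what changed: Builds only the first row explicitly and derives every subsequent row by rotating the previous row right by one (valid because all off-diagonal cells are 'X'), instead of deciding each cell with an inner loop.
import Mathlib
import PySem

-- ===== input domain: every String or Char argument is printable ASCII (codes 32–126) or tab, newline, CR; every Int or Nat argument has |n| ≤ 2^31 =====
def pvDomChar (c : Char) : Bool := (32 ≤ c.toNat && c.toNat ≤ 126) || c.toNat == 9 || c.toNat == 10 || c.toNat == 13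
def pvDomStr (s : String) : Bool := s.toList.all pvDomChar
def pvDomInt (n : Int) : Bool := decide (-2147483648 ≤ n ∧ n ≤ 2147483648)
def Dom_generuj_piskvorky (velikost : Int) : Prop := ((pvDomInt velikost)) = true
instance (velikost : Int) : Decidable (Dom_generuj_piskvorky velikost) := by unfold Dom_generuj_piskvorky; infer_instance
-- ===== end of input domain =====

-- B builds only the first row and derives each next row by rotating the previous one
-- right by one (all off-diagonal cells are "X", so rotation shifts the "O"): a different algorithm.


-- ===== PORT A =====
def generuj_piskvorky (velikost : Int) : List (List String) :=
  (PySem.List.pyRange 0 velikost 1).foldl (fun vysledek radek =>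
    vysledek ++ [(PySem.List.pyRange 0 velikost 1).foldl (fun seznam_radku bunka =>
      seznam_radku ++ [if bunka == radek then "O" else "X"]) []]) []

-- ===== PORT B =====
-- radek[-1:] + radek[:-1]  (rotate right by one)
def pvRotR (radek : List String) : List String :=
  PySem.List.slice radek (some (-1)) none ++ PySem.List.slice radek none (some (-1))

-- the 'for _ in range(velikost)' loop: append current row, then rotate
def pvRows (radek : List String) : Nat → List (List String)
  | 0 => []
  | k + 1 => radek :: pvRows (pvRotR radek) k

def generuj_piskvorky_alt (velikost : Int) : List (List String) :=
  pvRows (["O"] ++ List.replicate (velikost - 1).toNat "X") velikost.toNat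

-- ===== PRECONDITION & SPEC =====
def Spec_generuj_piskvorky (velikost : Int) (out : List (List String)) : Prop := out = generuj_piskvorky_alt velikost
instance (velikost : Int) (out : List (List String)) : Decidable (Spec_generuj_piskvorky velikost out) := by unfold Spec_generuj_piskvorky; infer_instance

-- ===== CLAIM (what is proved, stated in full; the proofs are below) =====
def Claim_equal_generuj_piskvorky : Prop := ∀ (velikost : Int), Dom_generuj_piskvorky velikost → Spec_generuj_piskvorky velikost (generuj_piskvorky velikost)

-- ===== LEMMAS AND PROOFS =====

-- the row with "O" at position i and "X" elsewhere
def pvRowN (n i : Nat) : List String := (List.range n).map (fun j => if j = i then "O" else "X")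

theorem pv_foldl_push {α β : Type} (l : List α) (f : α → β) (init : List β) :
    l.foldl (fun s b => s ++ [f b]) init = init ++ l.map f := by
  induction l generalizing init with
  | nil => simp
  | cons a t ih => simp [List.foldl_cons, ih]

theorem pvRowN_length (n i : Nat) : (pvRowN n i).length = n := by simp [pvRowN]

-- A's inner loop builds pvRowN
theorem pv_inner_eq (n r : Int) (h0 : 0 ≤ r) :
    (PySem.List.pyRange 0 n 1).foldl (fun s b => s ++ [if b == r then "O" else "X"]) ([] : List String)
      = pvRowN n.toNat r.toNat := by
  rw [pv_foldl_push, List.nil_append, PySem.List.pyRange_one, pvRowN, List.map_map]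
  simp only [Int.sub_zero]
  apply List.map_congr_left
  intro j _
  simp only [Function.comp_apply, beq_iff_eq]
  by_cases h : j = r.toNat
  · simp [h]
    omega
  · simp [h]
    omega

-- A as a map of pvRowN over the row indices
theorem pv_A_eq (velikost : Int) :
    generuj_piskvorky velikost = (List.range velikost.toNat).map (pvRowN velikost.toNat) := by
  unfold generuj_piskvorky
  rw [pv_foldl_push, List.nil_append]
  have hmap : (PySem.List.pyRange 0 velikost 1).map (fun radek =>
        (PySem.List.pyRange 0 velikost 1).foldl
          (fun s b => s ++ [if b == radek then "O" else "X"]) ([] : List String))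
      = (PySem.List.pyRange 0 velikost 1).map (fun radek => pvRowN velikost.toNat radek.toNat) := by
    apply List.map_congr_left
    intro r hr
    rw [PySem.List.mem_pyRange_one] at hr
    exact pv_inner_eq velikost r hr.1
  rw [hmap, PySem.List.pyRange_one, List.map_map]
  simp only [Int.sub_zero]
  apply List.map_congr_left
  intro j _
  simp only [Function.comp_apply]
  congr 1
  omega

-- rotating right moves the "O" one step right (while it is not in the last cell)
theorem pv_rot_row (n i : Nat) (h : i + 1 < n) :
    pvRotR (pvRowN n i) = pvRowN n (i + 1) := by
  unfold pvRotR
  rw [PySem.List.slice_from_neg_one, PySem.List.slice_to_neg_one]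
  apply List.ext_getElem
  · simp [pvRowN]
  · intro j hj hj'
    have hn : (pvRowN n i).length = n := pvRowN_length n i
    rcases Nat.eq_zero_or_pos j with hj0 | hjpos
    · subst hj0
      have hlt : n - 1 < (pvRowN n i).length := by omega
      rw [List.getElem_append_left (by simp [hn]; omega)]
      simp only [List.getElem_drop]
      simp [pvRowN]
      omega
    · have hdl : ((pvRowN n i).drop ((pvRowN n i).length - 1)).length = 1 := by
        simp [hn]; omega
      rw [List.getElem_append_right (by omega)]
      simp only [hdl, List.getElem_dropLast]
      simp [pvRowN] at hj' ⊢
      have hiff : (j - 1 = i) ↔ (j = i + 1) := by omega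
      simp only [hiff]

-- the rotation loop produces consecutive pvRowN rows
theorem pv_rows_eq (n : Nat) : ∀ (k i : Nat), i + k ≤ n →
    pvRows (pvRowN n i) k = (List.range k).map (fun t => pvRowN n (i + t)) := by
  intro k
  induction k with
  | zero => intro i _; simp [pvRows]
  | succ m ih =>
    intro i hle
    rw [pvRows]
    cases m with
    | zero => simp [pvRows]
    | succ m' =>
      have hrot : pvRotR (pvRowN n i) = pvRowN n (i + 1) := pv_rot_row n i (by omega)
      rw [hrot, ih (i + 1) (by omega)]
      conv_rhs => rw [List.range_succ_eq_map, List.map_cons, List.map_map]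
      refine List.cons_eq_cons.mpr ⟨rfl, ?_⟩
      apply List.map_congr_left
      intro t _
      simp only [Function.comp_apply]
      congr 1
      omega

-- B's initial row is pvRowN _ 0
theorem pv_init_row (velikost : Int) (h : 0 < velikost) :
    (["O"] ++ List.replicate (velikost - 1).toNat "X") = pvRowN velikost.toNat 0 := by
  apply List.ext_getElem
  · simp [pvRowN]; omega
  · intro j hj hj'
    rcases Nat.eq_zero_or_pos j with hj0 | hjpos
    · subst hj0; simp [pvRowN]
    · rw [List.getElem_append_right (by simp only [List.length_cons, List.length_nil]; omega)]
      simp [pvRowN]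
      omega

theorem generuj_piskvorky_eq (velikost : Int) :
    generuj_piskvorky velikost = generuj_piskvorky_alt velikost := by
  rw [pv_A_eq]
  unfold generuj_piskvorky_alt
  by_cases h : velikost ≤ 0
  · have : velikost.toNat = 0 := by omega
    simp [this, pvRows]
  · rw [pv_init_row velikost (by omega), pv_rows_eq velikost.toNat velikost.toNat 0 (by omega)]
    simp

-- ===== VERDICT (by name: the statement is the Claim_ definition above) =====
theorem generuj_piskvorky_spec : Claim_equal_generuj_piskvorky := by
  intro velikost _
  unfold Spec_generuj_piskvorky
  exact generuj_piskvorky_eq velikost
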